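-- pv_equiv track=rewrite | github.com/Cesar073/Punto-Venta-3 | sources/mod/form.py | Ajusta_A_2_Dec
-- ===== SOURCE A (Python) =====
-- def Ajusta_A_2_Dec(Valor):
--     Aux1 = str(Valor)
--     Bucle = 0
--     Cont_Dec = 0
--     largo = len(Aux1)
--     Aux2 = ''
--     Coma = False
--     while Bucle < largo:
--         Caracter = Aux1[Bucle]
--         if Coma == True:
--             Cont_Dec += 1
--             if Cont_Dec == 2:
--                 Aux2 += Caracter
--                 return Aux2
--             else:
--                 Aux2 += Caracter
--         else:
--             if Caracter == ',' or Caracter == '.':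
--                 Aux2 += '.'
--                 Coma = True
--             else:
--                 Aux2 += Caracter
--         Bucle += 1
--     return Aux2
-- ===== SOURCE B (Python) =====
-- def Ajusta_A_2_Dec(Valor):
--     s = str(Valor)
--     pos = next((i for i, ch in enumerate(s) if ch in (',', '.')), None)
--     if pos is None:
--         return s
--     return s[:pos] + '.' + s[pos+1:pos+3]
-- ===== Notes on version B (the rewrite author's own statement) =====
-- stated objective: simpler
-- what changed: Replaces A's stateful character-by-character while-loop (separator flag, decimal counter, string accumulator built one char at a time) with locating the first separator index (comma or period) and returning prefix + period + the next two characters by slicing.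
import Mathlib
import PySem

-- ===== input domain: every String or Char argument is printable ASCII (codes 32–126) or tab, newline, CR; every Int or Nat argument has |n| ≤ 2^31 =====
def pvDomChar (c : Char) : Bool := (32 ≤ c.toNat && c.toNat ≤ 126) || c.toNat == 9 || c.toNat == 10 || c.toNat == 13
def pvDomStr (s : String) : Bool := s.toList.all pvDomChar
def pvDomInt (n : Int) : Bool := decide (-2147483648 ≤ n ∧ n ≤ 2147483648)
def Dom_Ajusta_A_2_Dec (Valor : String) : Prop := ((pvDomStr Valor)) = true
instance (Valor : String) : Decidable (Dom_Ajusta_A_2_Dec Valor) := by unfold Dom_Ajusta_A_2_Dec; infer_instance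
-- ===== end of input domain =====

-- B replaces A's stateful character-by-character loop (Coma/Cont_Dec flags) by
-- finding the first separator index and slicing: simpler decomposition, same result.

-- ===== PORT A =====
-- A's while-loop over Aux1's characters, state = (Coma, Cont_Dec, Aux2).
def pvLoopA : List Char → Bool → Nat → List Char → List Char
  | [], _, _, aux2 => aux2
  | c :: rest, coma, cnt, aux2 =>
    if coma then
      if cnt + 1 = 2 then aux2 ++ [c]
      else pvLoopA rest coma (cnt + 1) (aux2 ++ [c])
    else
      if c = ',' ∨ c = '.' then pvLoopA rest true cnt (aux2 ++ ['.'])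
      else pvLoopA rest coma cnt (aux2 ++ [c])

def Ajusta_A_2_Dec (Valor : String) : String :=
  String.ofList (pvLoopA Valor.toList false 0 [])

-- ===== PORT B =====
-- Source B: pos = first index whose char is ',' or '.'; None → return s;
-- else s[:pos] + '.' + s[pos+1:pos+3].
def Ajusta_A_2_Dec_alt (Valor : String) : String :=
  let l := Valor.toList
  match l.findIdx? (fun c => c = ',' || c = '.') with
  | none => Valor
  | some p => String.ofList (l.take p ++ '.' :: (l.drop (p + 1)).take 2)

-- ===== PRECONDITION & SPEC =====
def Spec_Ajusta_A_2_Dec (Valor : String) (out : String) : Prop := out = Ajusta_A_2_Dec_alt Valor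
instance (Valor : String) (out : String) : Decidable (Spec_Ajusta_A_2_Dec Valor out) := by unfold Spec_Ajusta_A_2_Dec; infer_instance

-- ===== CLAIM (what is proved, stated in full; the proofs are below) =====
def Claim_equal_Ajusta_A_2_Dec : Prop := ∀ (Valor : String), Dom_Ajusta_A_2_Dec Valor → Spec_Ajusta_A_2_Dec Valor (Ajusta_A_2_Dec Valor)

-- ===== LEMMAS AND PROOFS =====

-- After the separator has been seen (coma = true, Cont_Dec = 1), one more char is copied.
lemma pvLoopA_coma_one (l : List Char) (aux2 : List Char) :
    pvLoopA l true 1 aux2 = aux2 ++ l.take 1 := by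
  cases l with
  | nil => simp [pvLoopA]
  | cons c rest => simp [pvLoopA]

-- After the separator has been seen (coma = true, Cont_Dec = 0), two more chars are copied.
lemma pvLoopA_coma_zero (l : List Char) (aux2 : List Char) :
    pvLoopA l true 0 aux2 = aux2 ++ l.take 2 := by
  cases l with
  | nil => simp [pvLoopA]
  | cons c rest =>
    simp [pvLoopA, pvLoopA_coma_one]

-- Main invariant: the loop from the initial state computes B's find-and-slice value.
lemma pvLoopA_main (l : List Char) (aux2 : List Char) :
    pvLoopA l false 0 aux2 =
      aux2 ++ (match l.findIdx? (fun c => c = ',' || c = '.') with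
               | none => l
               | some p => l.take p ++ '.' :: (l.drop (p + 1)).take 2) := by
  induction l generalizing aux2 with
  | nil => simp [pvLoopA]
  | cons c rest ih =>
    by_cases h : c = ',' ∨ c = '.'
    · have hb : (fun c => c = ',' || c = '.') c = true := by
        rcases h with h | h <;> simp [h]
      simp [pvLoopA, h, List.findIdx?_cons, hb, pvLoopA_coma_zero]
    · have hb : (fun c => c = ',' || c = '.') c = false := by
        rw [not_or] at h
        simp [h.1, h.2]
      rw [pvLoopA, if_neg (by simp : ¬ (false = true)), if_neg h, ih]
      rw [List.findIdx?_cons]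
      rw [if_neg (by simpa using hb)]
      cases hf : rest.findIdx? (fun c => c = ',' || c = '.') with
      | none => simp
      | some p => simp [List.take_succ_cons, List.drop_succ_cons]

-- ===== VERDICT (by name: the statement is the Claim_ definition above) =====
theorem Ajusta_A_2_Dec_spec : Claim_equal_Ajusta_A_2_Dec := by
  intro Valor _
  unfold Spec_Ajusta_A_2_Dec Ajusta_A_2_Dec Ajusta_A_2_Dec_alt
  rw [pvLoopA_main]
  cases h : Valor.toList.findIdx? (fun c => c = ',' || c = '.') <;>
    simp [h]
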